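-- pv_equiv track=rewrite | github.com/maderskog/.dotfiles | home/dot-config/television/scripts/network_interfaces.py | parse_hardware_ports
-- ===== SOURCE A (Python) =====
-- def parse_hardware_ports(raw_output: str) -> dict[str, dict[str, str]]:
--     mapping: dict[str, dict[str, str]] = {}
--     current: dict[str, str] = {}
--     for line in raw_output.splitlines():
--         stripped = line.strip()
--         if not stripped:
--             if current.get("device"):
--                 mapping[current["device"]] = dict(current)
--             current = {}
--             continue
--         if stripped.startswith("Hardware Port: "):
--             current["hardware_port"] = stripped.split(":", 1)[1].strip()
--         elif stripped.startswith("Device: "):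
--             current["device"] = stripped.split(":", 1)[1].strip()
--     if current.get("device"):
--         mapping[current["device"]] = dict(current)
--     return mapping
-- ===== SOURCE B (Python) =====
-- def parse_hardware_ports(raw_output: str) -> dict[str, dict[str, str]]:
--     # Phase 1: cut the input into blocks of consecutive non-blank lines.
--     blocks: list[list[str]] = []
--     cur: list[str] = []
--     for line in raw_output.splitlines():
--         if line.strip():
--             cur.append(line)
--         elif cur:
--             blocks.append(cur)
--             cur = []
--     if cur:
--         blocks.append(cur)
--     # Phase 2: build one entry per block; keep it only if it names a device.
--     mapping: dict[str, dict[str, str]] = {}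
--     for block in blocks:
--         entry: dict[str, str] = {}
--         for line in block:
--             s = line.strip()
--             if s.startswith("Hardware Port: "):
--                 entry["hardware_port"] = s.split(":", 1)[1].strip()
--             elif s.startswith("Device: "):
--                 entry["device"] = s.split(":", 1)[1].strip()
--         dev = entry.get("device")
--         if dev:
--             mapping[dev] = entry
--     return mapping
-- ===== Notes on version B (the rewrite author's own statement) =====
-- stated objective: alternative
-- what changed: Replaces A's single flush-on-blank state machine (with a duplicated EOF flush) by a two-phase decomposition: first group the lines into blocks of consecutive non-blank lines, then build one entry dict per block and keep it only if it names a device.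
import Mathlib
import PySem

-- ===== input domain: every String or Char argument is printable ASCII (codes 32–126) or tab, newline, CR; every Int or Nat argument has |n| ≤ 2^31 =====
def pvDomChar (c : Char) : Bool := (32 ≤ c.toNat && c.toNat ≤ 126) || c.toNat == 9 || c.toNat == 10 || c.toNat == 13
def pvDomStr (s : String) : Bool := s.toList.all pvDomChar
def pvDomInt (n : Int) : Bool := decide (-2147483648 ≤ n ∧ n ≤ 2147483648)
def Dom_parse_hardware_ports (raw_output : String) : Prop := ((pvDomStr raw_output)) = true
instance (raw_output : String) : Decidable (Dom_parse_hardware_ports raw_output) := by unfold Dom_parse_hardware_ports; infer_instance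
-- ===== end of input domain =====

-- B replaces A's flush-on-blank state machine (with its duplicated EOF flush) by a two-phase
-- decomposition: group lines into non-blank blocks first, then build one entry per block (alternative).

-- ===== PORT A =====
-- stripped.split(":", 1)[1].strip(); the .getD defaults are unreachable under the
-- startswith guards, which guarantee ':' occurs in stripped.
def pvValA (stripped : String) : String :=
  PySem.Str.strip (((PySem.Str.splitMax? stripped ":" 1).getD []).getD 1 "")

-- the per-iteration flush: if current.get("device"): mapping[current["device"]] = dict(current)
def pvFlushA (m : PySem.Dict String (PySem.Dict String String))
    (c : PySem.Dict String String) : PySem.Dict String (PySem.Dict String String) :=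
  match PySem.Dict.get? c "device" with
  | some d => if d ≠ "" then PySem.Dict.insert m d c else m
  | none => m

def pvStepA (st : PySem.Dict String (PySem.Dict String String) × PySem.Dict String String)
    (line : String) :
    PySem.Dict String (PySem.Dict String String) × PySem.Dict String String :=
  let stripped := PySem.Str.strip line
  if stripped = "" then
    (pvFlushA st.1 st.2, PySem.Dict.empty)
  else if PySem.Str.startswith stripped "Hardware Port: " then
    (st.1, PySem.Dict.insert st.2 "hardware_port" (pvValA stripped))
  else if PySem.Str.startswith stripped "Device: " then
    (st.1, PySem.Dict.insert st.2 "device" (pvValA stripped))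
  else st

def parse_hardware_ports (raw_output : String) : List (String × List (String × String)) :=
  let st := (PySem.Str.splitlines raw_output).foldl pvStepA (PySem.Dict.empty, PySem.Dict.empty)
  ((pvFlushA st.1 st.2).items).map (fun p => (p.1, p.2.items))

-- ===== PORT B =====
-- phase 1: one step of the block-cutting loop
def pvSplitStepB (st : List (List String) × List String) (line : String) :
    List (List String) × List String :=
  if PySem.Str.strip line ≠ "" then (st.1, st.2 ++ [line])
  else if st.2 ≠ [] then (st.1 ++ [st.2], []) else st

def pvBlocksB (lines : List String) : List (List String) :=
  let st := lines.foldl pvSplitStepB ([], [])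
  if st.2 ≠ [] then st.1 ++ [st.2] else st.1

-- phase 2: scan one block line
def pvEntryStepB (e : PySem.Dict String String) (line : String) : PySem.Dict String String :=
  let s := PySem.Str.strip line
  if PySem.Str.startswith s "Hardware Port: " then
    PySem.Dict.insert e "hardware_port"
      (PySem.Str.strip (((PySem.Str.splitMax? s ":" 1).getD []).getD 1 ""))
  else if PySem.Str.startswith s "Device: " then
    PySem.Dict.insert e "device"
      (PySem.Str.strip (((PySem.Str.splitMax? s ":" 1).getD []).getD 1 ""))
  else e

def pvAddBlockB (m : PySem.Dict String (PySem.Dict String String)) (block : List String) :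
    PySem.Dict String (PySem.Dict String String) :=
  let entry := block.foldl pvEntryStepB PySem.Dict.empty
  match PySem.Dict.get? entry "device" with
  | some dev => if dev ≠ "" then PySem.Dict.insert m dev entry else m
  | none => m

def parse_hardware_ports_alt (raw_output : String) : List (String × List (String × String)) :=
  (((pvBlocksB (PySem.Str.splitlines raw_output)).foldl pvAddBlockB PySem.Dict.empty).items).map
    (fun p => (p.1, p.2.items))

-- ===== PRECONDITION & SPEC =====
def Spec_parse_hardware_ports (raw_output : String) (out : List (String × List (String × String))) : Prop := out = parse_hardware_ports_alt raw_output
instance (raw_output : String) (out : List (String × List (String × String))) : Decidable (Spec_parse_hardware_ports raw_output out) := by unfold Spec_parse_hardware_ports; infer_instance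

-- ===== CLAIM (what is proved, stated in full; the proofs are below) =====
def Claim_equal_parse_hardware_ports : Prop := ∀ (raw_output : String), Dom_parse_hardware_ports raw_output → Spec_parse_hardware_ports raw_output (parse_hardware_ports raw_output)

-- ===== LEMMAS AND PROOFS =====

-- recursive characterisation of B's block cutting, starting with partial block `cur`
def pvBlocksAux (cur : List String) : List String → List (List String)
  | [] => if cur ≠ [] then [cur] else []
  | l :: ls =>
    if PySem.Str.strip l ≠ "" then pvBlocksAux (cur ++ [l]) ls
    else if cur ≠ [] then cur :: pvBlocksAux [] ls else pvBlocksAux [] ls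

lemma pvBlocksB_aux (lines : List String) : ∀ (bs : List (List String)) (cur : List String),
    (let st := lines.foldl pvSplitStepB (bs, cur)
     if st.2 ≠ [] then st.1 ++ [st.2] else st.1) = bs ++ pvBlocksAux cur lines := by
  induction lines with
  | nil =>
    intro bs cur
    by_cases hc : cur = [] <;> simp [pvBlocksAux, hc]
  | cons l ls ih =>
    intro bs cur
    by_cases h : PySem.Str.strip l = ""
    · by_cases hc : cur = []
      · simp only [List.foldl, pvSplitStepB, pvBlocksAux, h, hc]
        simpa using ih bs []
      · simp only [List.foldl, pvSplitStepB, pvBlocksAux, h, hc, ne_eq,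
          not_true_eq_false, if_false, not_false_eq_true, if_true]
        rw [ih (bs ++ [cur]) []]
        simp
    · simp only [List.foldl, pvSplitStepB, pvBlocksAux, h, ne_eq, not_false_eq_true,
        if_true]
      exact ih bs (cur ++ [l])

lemma pvBlocksB_eq (lines : List String) : pvBlocksB lines = pvBlocksAux [] lines := by
  have := pvBlocksB_aux lines [] []
  simpa [pvBlocksB] using this

lemma pvStepA_nonblank (m : PySem.Dict String (PySem.Dict String String))
    (c : PySem.Dict String String) (l : String) (h : PySem.Str.strip l ≠ "") :
    pvStepA (m, c) l = (m, pvEntryStepB c l) := by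
  simp only [pvStepA, pvEntryStepB, pvValA, h, if_false]
  split_ifs <;> rfl

lemma pvFlushA_empty (m : PySem.Dict String (PySem.Dict String String)) :
    pvFlushA m PySem.Dict.empty = m := rfl

lemma pvAddBlockB_eq_flush (m : PySem.Dict String (PySem.Dict String String))
    (b : List String) :
    pvAddBlockB m b = pvFlushA m (b.foldl pvEntryStepB PySem.Dict.empty) := rfl

-- main invariant: running A's state machine over `lines` starting with the partial block `cur`
-- (as an entry dict) and mapping `m`, then doing the EOF flush, equals folding B's per-block
-- processing over the blocks cut out of `cur ++ lines`.
lemma pvMain (lines : List String) :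
    ∀ (m : PySem.Dict String (PySem.Dict String String)) (cur : List String),
    (fun st => pvFlushA st.1 st.2)
        (lines.foldl pvStepA (m, cur.foldl pvEntryStepB PySem.Dict.empty))
      = (pvBlocksAux cur lines).foldl pvAddBlockB m := by
  induction lines with
  | nil =>
    intro m cur
    by_cases hc : cur = []
    · subst hc
      simp [pvBlocksAux, pvFlushA_empty]
    · simp [pvBlocksAux, hc, pvAddBlockB_eq_flush]
  | cons l ls ih =>
    intro m cur
    by_cases h : PySem.Str.strip l = ""
    · have hstep : pvStepA (m, cur.foldl pvEntryStepB PySem.Dict.empty) l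
          = (pvFlushA m (cur.foldl pvEntryStepB PySem.Dict.empty), PySem.Dict.empty) := by
        simp [pvStepA, h]
      have hrec := ih (pvFlushA m (cur.foldl pvEntryStepB PySem.Dict.empty)) []
      simp only [List.foldl] at hrec
      by_cases hc : cur = []
      · subst hc
        simp only [List.foldl, pvBlocksAux, h, ne_eq, not_true_eq_false, if_false,
          List.foldl_nil] at hstep hrec ⊢
        rw [hstep]
        simpa [pvFlushA_empty] using hrec
      · simp only [List.foldl, pvBlocksAux, h, hc, ne_eq, not_true_eq_false, if_false,
          not_false_eq_true, if_true] at hstep hrec ⊢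
        rw [hstep, pvAddBlockB_eq_flush]
        exact hrec
    · simp only [List.foldl, pvBlocksAux, h, ne_eq, not_false_eq_true, if_true]
      rw [pvStepA_nonblank _ _ _ h]
      have : pvEntryStepB (cur.foldl pvEntryStepB PySem.Dict.empty) l
          = (cur ++ [l]).foldl pvEntryStepB PySem.Dict.empty := by
        simp [List.foldl_append]
      rw [this]
      exact ih m (cur ++ [l])

-- ===== VERDICT (by name: the statement is the Claim_ definition above) =====
theorem parse_hardware_ports_spec : Claim_equal_parse_hardware_ports := by
  intro raw _
  unfold Spec_parse_hardware_ports parse_hardware_ports parse_hardware_ports_alt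
  rw [pvBlocksB_eq]
  have := pvMain (PySem.Str.splitlines raw) PySem.Dict.empty []
  simp only [List.foldl] at this
  simp only [← this]
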